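-- pv_equiv track=rewrite | github.com/NKauppila/NKauppila | Midterm/midterm.py | birthday_count
-- ===== SOURCE A (Python) =====
-- def birthday_count(dates_list):
--     """Returns the total number of birthday pairs in the dates_list"""
--
--     count = 0
--     counted_list = []
--
--     for item in dates_list:
--         if dates_list.count(item)>1 and item not in counted_list:
--             counted_list.append(item)
--             count += dates_list.count(item)
--
--     return count
-- ===== SOURCE B (Python) =====
-- def birthday_count(dates_list):
--     """Returns the total number of birthday pairs in the dates_list"""
--     counts = {}
--     for d in dates_list:
--         counts[d] = counts.get(d, 0) + 1
--     return sum(c for c in counts.values() if c > 1)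
-- ===== Notes on version B (the rewrite author's own statement) =====
-- stated objective: faster
-- what changed: Replaces the quadratic loop with repeated list.count scans and a 'counted' membership list by a single pass that builds a count dictionary, then sums the counts greater than 1.
import Mathlib
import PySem

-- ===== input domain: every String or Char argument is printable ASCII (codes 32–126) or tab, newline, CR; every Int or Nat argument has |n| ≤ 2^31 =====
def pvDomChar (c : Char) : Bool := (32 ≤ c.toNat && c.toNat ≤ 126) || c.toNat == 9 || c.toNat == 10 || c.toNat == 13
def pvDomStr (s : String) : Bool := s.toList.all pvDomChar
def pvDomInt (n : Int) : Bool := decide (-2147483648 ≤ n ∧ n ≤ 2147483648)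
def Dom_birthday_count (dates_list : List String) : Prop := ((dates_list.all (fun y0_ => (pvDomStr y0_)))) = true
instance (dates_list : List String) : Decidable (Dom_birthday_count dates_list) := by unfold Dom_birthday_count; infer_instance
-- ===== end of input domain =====

-- B replaces A's quadratic repeated-list.count loop by one counting pass over a dict
-- plus a sum of the counts greater than 1 (objective: faster).

-- ===== PORT A =====
def birthday_count (dates_list : List String) : Int :=
  (dates_list.foldl
    (fun (st : Int × List String) item =>
      if 1 < dates_list.count item ∧ item ∉ st.2
      then (st.1 + (dates_list.count item : Int), st.2 ++ [item])
      else st)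
    (0, [])).1

-- ===== PORT B =====
def birthday_count_alt (dates_list : List String) : Int :=
  let counts : PySem.Dict String Int :=
    dates_list.foldl (fun d x => d.insert x (d.getD x 0 + 1)) PySem.Dict.empty
  ((counts.values).filter (fun c => decide (1 < c))).sum

-- ===== PRECONDITION & SPEC =====
def Spec_birthday_count (dates_list : List String) (out : Int) : Prop := out = birthday_count_alt dates_list
instance (dates_list : List String) (out : Int) : Decidable (Spec_birthday_count dates_list out) := by unfold Spec_birthday_count; infer_instance

-- ===== CLAIM (what is proved, stated in full; the proofs are below) =====
def Claim_equal_birthday_count : Prop := ∀ (dates_list : List String), Dom_birthday_count dates_list → Spec_birthday_count dates_list (birthday_count dates_list)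

-- ===== LEMMAS AND PROOFS =====

/-- A `Set.add` fold only appends, so the initial set is a prefix of the result. -/
theorem prefix_foldl_add (l : List String) : ∀ (s : PySem.Set String), s <+: l.foldl PySem.Set.add s := by
  induction l with
  | nil => intro s; simp
  | cons x t ih =>
    intro s
    refine List.IsPrefix.trans ?_ (ih (PySem.Set.add s x))
    simp only [PySem.Set.add]
    split
    · exact List.prefix_refl s
    · exact List.prefix_append s [x]

theorem drop_of_prefix_append (u w : List String) (x : String)
    (h : u ++ [x] <+: w) : w.drop u.length = x :: w.drop (u.length + 1) := by
  obtain ⟨r, rfl⟩ := h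
  rw [List.append_assoc]
  simp

/-- A's loop, started from counted list `c` and accumulator `acc`, adds the counts of the
    fresh duplicate-group representatives it discovers (filter, then first-occurrence dedup). -/
theorem loopA_eq (full : List String) (l : List String) : ∀ (c : List String) (acc : Int),
    (l.foldl (fun (st : Int × List String) item =>
        if 1 < full.count item ∧ item ∉ st.2
        then (st.1 + (full.count item : Int), st.2 ++ [item])
        else st) (acc, c)).1
    = acc + ((((l.filter (fun x => decide (1 < full.count x))).foldl PySem.Set.add c).drop
        c.length).map (fun k => (full.count k : Int))).sum := by
  induction l with
  | nil => intro c acc; simp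
  | cons x t ih =>
    intro c acc
    by_cases hp : 1 < full.count x
    · by_cases hc : x ∈ c
      · have hstep : PySem.Set.add c x = c := by
          simp [PySem.Set.add, PySem.Set.contains, hc]
        simp only [List.foldl_cons, List.filter_cons, hp, hc, decide_true, if_true,
          not_true, and_false, if_false, hstep]
        exact ih c acc
      · have hstep : PySem.Set.add c x = c ++ [x] := by
          simp [PySem.Set.add, PySem.Set.contains, hc]
        have hpre : c ++ [x] <+: (t.filter (fun x => decide (1 < full.count x))).foldl PySem.Set.add (c ++ [x]) :=
          prefix_foldl_add _ _
        have hdrop := drop_of_prefix_append c _ x hpre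
        simp only [List.foldl_cons, List.filter_cons, hp, hc, decide_true, if_true,
          not_false_iff, and_true, if_true, hstep]
        rw [ih (c ++ [x]) (acc + (full.count x : Int))]
        rw [hdrop]
        simp [List.length_append]
        ring
    · simp only [List.foldl_cons, List.filter_cons, hp, decide_false, if_false, false_and]
      exact ih c acc

/-- Filtering commutes with first-occurrence dedup by `Set.add`. -/
theorem ofList_filter_comm (p : String → Bool) (l : List String) : ∀ (s : List String),
    (l.foldl PySem.Set.add s).filter p = (l.filter p).foldl PySem.Set.add (s.filter p) := by
  induction l with
  | nil => intro s; rfl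
  | cons x t ih =>
    intro s
    by_cases hp : p x
    · by_cases hs : x ∈ s
      · have h1 : PySem.Set.add s x = s := by simp [PySem.Set.add, PySem.Set.contains, hs]
        have h2 : PySem.Set.add (s.filter p) x = s.filter p := by
          simp [PySem.Set.add, PySem.Set.contains, List.mem_filter, hs, hp]
        simp only [List.foldl_cons, List.filter_cons, hp, if_true, h1, h2]
        exact ih s
      · have h1 : PySem.Set.add s x = s ++ [x] := by simp [PySem.Set.add, PySem.Set.contains, hs]
        have h2 : PySem.Set.add (s.filter p) x = s.filter p ++ [x] := by
          simp [PySem.Set.add, PySem.Set.contains, List.mem_filter, hs]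
        simp only [List.foldl_cons, List.filter_cons, hp, if_true, h1, h2]
        rw [ih (s ++ [x])]
        simp [List.filter_append, hp]
    · have h1 : (PySem.Set.add s x).filter p = s.filter p := by
        simp only [PySem.Set.add]
        split
        · rfl
        · simp [List.filter_append, hp]
      simp only [List.foldl_cons, List.filter_cons, hp]
      rw [ih (PySem.Set.add s x), h1]
      simp

theorem birthday_count_eq_alt (xs : List String) : birthday_count xs = birthday_count_alt xs := by
  have hA := loopA_eq xs xs [] 0
  have hB : birthday_count_alt xs
      = (((PySem.Set.ofList xs).map (fun k => (xs.count k : Int))).filter (fun c => decide (1 < c))).sum := by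
    show ((((xs.foldl (fun d x => d.insert x (d.getD x 0 + 1)) (PySem.Dict.empty : PySem.Dict String Int))).values).filter (fun c => decide (1 < c))).sum = _
    rw [PySem.Dict.foldl_insert_getD_add_one_eq_counter]
    have hv : (PySem.Dict.counter xs).values = (PySem.Set.ofList xs).map (fun k => (xs.count k : Int)) := by
      show ((PySem.Dict.counter xs).items).map (·.2) = _
      rw [PySem.Dict.items_counter, List.map_map]
      rfl
    rw [hv]
  rw [hB, List.filter_map]
  have hfc : ((PySem.Set.ofList xs).filter ((fun c => decide (1 < c)) ∘ (fun k => (xs.count k : Int))))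
      = (PySem.Set.ofList xs).filter (fun x => decide (1 < xs.count x)) := by
    apply List.filter_congr
    intro x _
    simp
  rw [hfc, PySem.Set.ofList_eq_foldl, ofList_filter_comm (fun x => decide (1 < xs.count x)) xs []]
  simpa [birthday_count] using hA

-- ===== VERDICT (by name: the statement is the Claim_ definition above) =====
theorem birthday_count_spec : Claim_equal_birthday_count := by
  intro dates_list _
  exact birthday_count_eq_alt dates_list
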